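-- pv_equiv track=rewrite | github.com/MistMezalla/Laptop-Backup | CS 201 (Algorithm)/Lecture Qns/Python/Knapsack without profit.py | knapsack_without_profit_top_down
-- ===== SOURCE A (Python) =====
-- def knapsack_without_profit_top_down(sizes,limit):
--     memo = [[-1]*len(sizes) for _ in range(limit+1)]
--
--     def rec_helper(lim,st):
--         if st == len(sizes) or lim == 0:
--             return 0
--
--         elif memo[lim][st] != - 1:
--             return memo[lim][st]
--
--         else:
--             res1 = 0
--             res2 = rec_helper(lim,st+1)
--             if lim>=sizes[st]:
--                 res1 = rec_helper(lim - sizes[st],st+1) + sizes[st]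
--
--             memo[lim][st] = max(res1,res2)
--
--             return memo[lim][st]
--
--     return rec_helper(limit,0)
-- ===== SOURCE B (Python) =====
-- def knapsack_without_profit_top_down(sizes, limit):
--     if limit < 0:
--         return 0
--     row = [0] * (limit + 1)
--     for s in reversed(sizes):
--         row = [max(row[lim], row[lim - s] + s) if lim >= s else row[lim]
--                for lim in range(limit + 1)]
--     return row[limit]
-- ===== Notes on version B (the rewrite author's own statement) =====
-- stated objective: simpler
-- what changed: Replaces the memoized top-down recursion over (limit, index) with an iterative bottom-up DP that folds the reversed item list over a single capacity row.
-- outside the precondition, e.g. on knapsack_without_profit_top_down([-1], 2): A returns 0, B raises IndexError; on knapsack_without_profit_top_down([1, -1], 3): A returns 1, B raises IndexError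
import Mathlib
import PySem

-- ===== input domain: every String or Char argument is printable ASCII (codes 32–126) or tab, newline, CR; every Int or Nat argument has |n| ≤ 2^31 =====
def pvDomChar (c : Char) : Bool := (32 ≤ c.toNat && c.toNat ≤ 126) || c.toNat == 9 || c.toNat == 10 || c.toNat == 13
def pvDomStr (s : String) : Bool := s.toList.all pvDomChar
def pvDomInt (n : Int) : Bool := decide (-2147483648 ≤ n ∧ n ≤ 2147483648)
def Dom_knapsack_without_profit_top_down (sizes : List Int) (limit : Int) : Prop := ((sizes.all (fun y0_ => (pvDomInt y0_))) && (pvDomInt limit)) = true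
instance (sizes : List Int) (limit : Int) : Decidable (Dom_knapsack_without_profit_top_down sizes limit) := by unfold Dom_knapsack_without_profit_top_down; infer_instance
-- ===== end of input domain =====

-- B replaces A's memoized top-down recursion by a bottom-up DP folding the reversed item
-- list over one capacity row (objective: simpler). Return-value equivalence only: A builds
-- and mutates a local memo table, B does not.

-- ===== PORT A =====
-- memo[lim][st] read; exact for the nonnegative in-range indices reached under Pre_
-- (Python raises on out-of-range reads, which Pre_ excludes).
def pvGet2 (memo : List (List Int)) (lim : Int) (st : Nat) : Int :=
  (memo.getD lim.toNat []).getD st (-1)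

-- memo[lim][st] = v; exact for the nonnegative in-range indices reached under Pre_.
def pvSet2 (memo : List (List Int)) (lim : Int) (st : Nat) (v : Int) : List (List Int) :=
  memo.set lim.toNat ((memo.getD lim.toNat []).set st v)

-- rec_helper, threading the mutated memo through; st is the Python index (always a Nat:
-- it starts at 0 and only increments).  Python tests `st == len(sizes)`; `≤` is the same
-- test on every reachable st and makes termination manifest.
def pvRecHelper (sizes : List Int) (lim : Int) (st : Nat) (memo : List (List Int)) :
    Int × List (List Int) :=
  if sizes.length ≤ st ∨ lim = 0 then (0, memo)
  else if pvGet2 memo lim st ≠ -1 then (pvGet2 memo lim st, memo)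
  else
    let p2 := pvRecHelper sizes lim (st + 1) memo          -- res2 = rec_helper(lim, st+1)
    let s := sizes.getD st 0                               -- sizes[st] (in range: st < len)
    let p1 := if s ≤ lim then                              -- if lim >= sizes[st]:
        let q := pvRecHelper sizes (lim - s) (st + 1) p2.2
        (q.1 + s, q.2)                                     -- res1 = rec(...) + sizes[st]
      else ((0 : Int), p2.2)                               -- res1 = 0
    (max p1.1 p2.1, pvSet2 p1.2 lim st (max p1.1 p2.1))    -- memo[lim][st] = max(res1,res2)
termination_by sizes.length - st
decreasing_by all_goals omega

def knapsack_without_profit_top_down (sizes : List Int) (limit : Int) : Int :=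
  let memo := List.replicate (limit + 1).toNat (List.replicate sizes.length (-1 : Int))
  (pvRecHelper sizes limit 0 memo).1

-- ===== PORT B =====
-- one DP step: row = [max(row[lim], row[lim-s]+s) if lim >= s else row[lim] for lim in range(limit+1)]
-- (indices are nonnegative and in range under Pre_, where the port is exact).
def pvStepRow (limit : Int) (row : List Int) (s : Int) : List Int :=
  (List.range (limit + 1).toNat).map (fun (i : Nat) =>
    let lim : Int := (i : Int)
    if s ≤ lim then max (row.getD i 0) (row.getD (lim - s).toNat 0 + s)
    else row.getD i 0)

def knapsack_without_profit_top_down_alt (sizes : List Int) (limit : Int) : Int :=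
  if limit < 0 then 0
  else
    let row := sizes.reverse.foldl (pvStepRow limit) (List.replicate (limit + 1).toNat 0)
    row.getD limit.toNat 0

-- ===== PRECONDITION & SPEC =====
-- Pre_ excludes (a) a negative limit with non-empty sizes, where A raises IndexError, and
-- (b) negative item sizes, on which A raises IndexError for most inputs (it recurses to
-- capacities above limit, outside the memo table) and otherwise returns accidental values
-- of that out-of-range recursion; B's row-DP has no cells for such capacities and raises.
def Pre_knapsack_without_profit_top_down (sizes : List Int) (limit : Int) : Prop :=
  (∀ s ∈ sizes, 0 ≤ s) ∧ (0 ≤ limit ∨ sizes = [])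
instance (sizes : List Int) (limit : Int) : Decidable (Pre_knapsack_without_profit_top_down sizes limit) := by unfold Pre_knapsack_without_profit_top_down; infer_instance
def pvWitness_knapsack_without_profit_top_down : List Int × Int := ([1, 2, 3], 4)

def Spec_knapsack_without_profit_top_down (sizes : List Int) (limit : Int) (out : Int) : Prop := out = knapsack_without_profit_top_down_alt sizes limit
instance (sizes : List Int) (limit : Int) (out : Int) : Decidable (Spec_knapsack_without_profit_top_down sizes limit out) := by unfold Spec_knapsack_without_profit_top_down; infer_instance

-- ===== CLAIM (what is proved, stated in full; the proofs are below) =====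
def Claim_equal_knapsack_without_profit_top_down : Prop := ∀ (sizes : List Int) (limit : Int), Dom_knapsack_without_profit_top_down sizes limit → Pre_knapsack_without_profit_top_down sizes limit → Spec_knapsack_without_profit_top_down sizes limit (knapsack_without_profit_top_down sizes limit)


-- ===== LEMMAS AND PROOFS =====

-- The common mathematical value: pvK suffix lim = A's pure recurrence.
def pvK : List Int → Int → Int
  | [], _ => 0
  | s :: rest, lim =>
      if lim = 0 then 0
      else max (if s ≤ lim then pvK rest (lim - s) + s else 0) (pvK rest lim)

lemma pvK_zero (t : List Int) : pvK t 0 = 0 := by cases t <;> simp [pvK]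

lemma pvK_nonneg (t : List Int) (h : ∀ s ∈ t, 0 ≤ s) (lim : Int) (hl : 0 ≤ lim) :
    0 ≤ pvK t lim := by
  induction t generalizing lim with
  | nil => simp [pvK]
  | cons s rest ih =>
    simp only [pvK]
    split
    · exact le_refl 0
    · exact le_trans (ih (fun x hx => h x (List.mem_cons_of_mem _ hx)) lim hl)
        (le_max_right _ _)

-- memo invariant: every non-(-1) cell already stores the pure value.
def pvGood (sizes : List Int) (memo : List (List Int)) : Prop :=
  ∀ (lim : Int) (st : Nat), 0 ≤ lim →
    pvGet2 memo lim st = -1 ∨ pvGet2 memo lim st = pvK (sizes.drop st) lim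

lemma pvGood_init (sizes : List Int) (m n : Nat) :
    pvGood sizes (List.replicate m (List.replicate n (-1 : Int))) := by
  intro lim st _
  left
  unfold pvGet2
  simp only [List.getD, List.getElem?_replicate]
  split
  · rw [Option.getD_some, List.getElem?_replicate]
    split <;> simp
  · simp

lemma pvGood_set (sizes : List Int) (memo : List (List Int)) (hg : pvGood sizes memo)
    (lim : Int) (st : Nat) (hl : 0 < lim) (v : Int) (hv : v = pvK (sizes.drop st) lim) :
    pvGood sizes (pvSet2 memo lim st v) := by
  intro lim' st' hl'
  have hbase := hg lim' st' hl'
  unfold pvGet2 pvSet2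
  unfold pvGet2 at hbase
  simp only [List.getD] at hbase ⊢
  by_cases hrow : lim'.toNat = lim.toNat
  · have hlim : lim' = lim := by omega
    subst hlim
    rcases lt_or_ge lim'.toNat memo.length with hm | hm
    · rw [List.getElem?_set_self hm, Option.getD_some]
      by_cases hst : st = st'
      · subst hst
        rcases lt_or_ge st (memo[lim'.toNat]?.getD []).length with hn | hn
        · right
          rw [List.getElem?_set_self hn, Option.getD_some, hv]
        · rw [List.getElem?_set, if_pos rfl, if_neg (by omega)]
          simp
      · rw [List.getElem?_set_ne hst]
        exact hbase
    · have h1 : (memo.set lim'.toNat ((memo[lim'.toNat]?.getD []).set st v))[lim'.toNat]? = none :=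
        List.getElem?_eq_none (by simpa using hm)
      rw [h1]
      have h2 : memo[lim'.toNat]? = none := List.getElem?_eq_none (by simpa using hm)
      rw [h2] at hbase
      exact hbase
  · rw [List.getElem?_set_ne (fun h => hrow h.symm)]
    exact hbase

lemma pvRec_correct (sizes : List Int) (hs : ∀ s ∈ sizes, 0 ≤ s) :
    ∀ (fuel st : Nat) (lim : Int), sizes.length - st ≤ fuel → 0 ≤ lim →
      ∀ memo, pvGood sizes memo →
      (pvRecHelper sizes lim st memo).1 = pvK (sizes.drop st) lim ∧
      pvGood sizes (pvRecHelper sizes lim st memo).2 := by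
  intro fuel
  induction fuel with
  | zero =>
    intro st lim hf hl memo hg
    have hst : sizes.length ≤ st := by omega
    rw [pvRecHelper, if_pos (Or.inl hst)]
    constructor
    · simp [List.drop_eq_nil_of_le hst, pvK]
    · exact hg
  | succ fuel ih =>
    intro st lim hf hl memo hg
    rw [pvRecHelper]
    by_cases hbase : sizes.length ≤ st ∨ lim = 0
    · rw [if_pos hbase]
      refine ⟨?_, hg⟩
      rcases hbase with h | h
      · simp [List.drop_eq_nil_of_le h, pvK]
      · simp [h, pvK_zero]
    · rw [if_neg hbase]
      have hstlen : st < sizes.length := by omega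
      have hlim0 : lim ≠ 0 := fun h => hbase (Or.inr h)
      by_cases hmemo : pvGet2 memo lim st ≠ -1
      · rw [if_pos hmemo]
        rcases hg lim st hl with h | h
        · exact absurd h hmemo
        · exact ⟨h, hg⟩
      · rw [if_neg hmemo]
        simp only []
        have hdrop : sizes.drop st = sizes[st] :: sizes.drop (st + 1) :=
          List.drop_eq_getElem_cons hstlen
        have hsget : sizes.getD st 0 = sizes[st] := List.getD_eq_getElem sizes 0 hstlen
        have hsmem : sizes[st] ∈ sizes := List.getElem_mem hstlen
        have hs0 : 0 ≤ sizes[st] := hs _ hsmem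
        obtain ⟨ih2a, ih2b⟩ := ih (st + 1) lim (by omega) hl memo hg
        set p2 := pvRecHelper sizes lim (st + 1) memo with hp2
        by_cases htake : sizes.getD st 0 ≤ lim
        · rw [if_pos htake]
          obtain ⟨ih1a, ih1b⟩ := ih (st + 1) (lim - sizes.getD st 0) (by omega)
            (by rw [hsget]; omega) p2.2 ih2b
          set q := pvRecHelper sizes (lim - sizes.getD st 0) (st + 1) p2.2 with hq
          have hval : max (q.1 + sizes.getD st 0) p2.1 = pvK (sizes.drop st) lim := by
            rw [hdrop, pvK, if_neg hlim0, ih1a, ih2a, hsget, if_pos (hsget ▸ htake)]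
          exact ⟨hval, pvGood_set sizes q.2 ih1b lim st (by omega) _ hval⟩
        · rw [if_neg htake]
          have hval : max (0 : Int) p2.1 = pvK (sizes.drop st) lim := by
            rw [hdrop, pvK, if_neg hlim0, ih2a, if_neg (hsget ▸ htake)]
          exact ⟨hval, pvGood_set sizes p2.2 ih2b lim st (by omega) _ hval⟩

lemma knapsackA_eq_pvK (sizes : List Int) (limit : Int) (hs : ∀ s ∈ sizes, 0 ≤ s)
    (hl : 0 ≤ limit) : knapsack_without_profit_top_down sizes limit = pvK sizes limit := by
  unfold knapsack_without_profit_top_down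
  have := (pvRec_correct sizes hs sizes.length 0 limit (by omega) hl _
    (pvGood_init sizes (limit + 1).toNat sizes.length)).1
  simpa using this

-- B side: the row after folding a suffix t is [pvK t 0, …, pvK t limit].
def pvRowOf (limit : Int) (t : List Int) : List Int :=
  (List.range (limit + 1).toNat).map (fun (i : Nat) => pvK t (i : Int))

lemma pvRowOf_getD (limit : Int) (t : List Int) (i : Nat) (hi : i < (limit + 1).toNat) :
    (pvRowOf limit t).getD i 0 = pvK t (i : Int) := by
  unfold pvRowOf
  rw [List.getD, List.getElem?_map, List.getElem?_range hi]
  rfl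

lemma pvRowOf_nil (limit : Int) :
    pvRowOf limit [] = List.replicate (limit + 1).toNat 0 := by
  unfold pvRowOf
  simp [pvK, List.map_const']

lemma pvStepRow_rowOf (limit : Int) (t : List Int) (s : Int) (hs : 0 ≤ s)
    (ht : ∀ x ∈ t, 0 ≤ x) :
    pvStepRow limit (pvRowOf limit t) s = pvRowOf limit (s :: t) := by
  unfold pvStepRow
  conv_rhs => unfold pvRowOf
  apply List.map_congr_left
  intro i hi
  have hiN : i < (limit + 1).toNat := List.mem_range.mp hi
  simp only []
  by_cases hsi : s ≤ (i : Int)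
  · rw [if_pos hsi]
    have hsub : ((i : Int) - s).toNat < (limit + 1).toNat := by omega
    have hcast : ((((i : Int) - s).toNat : Nat) : Int) = (i : Int) - s := by omega
    rw [pvRowOf_getD limit t i hiN, pvRowOf_getD limit t _ hsub, hcast]
    by_cases hzero : (i : Int) = 0
    · have hs0 : s = 0 := by omega
      simp [pvK, hzero, hs0, pvK_zero]
    · rw [pvK, if_neg hzero, if_pos hsi, max_comm]
  · rw [if_neg hsi]
    rw [pvRowOf_getD limit t i hiN]
    by_cases hzero : (i : Int) = 0
    · simp [pvK, hzero, pvK_zero]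
    · rw [pvK, if_neg hzero, if_neg hsi]
      exact (max_eq_right (pvK_nonneg t ht _ (Int.natCast_nonneg i))).symm

lemma knapsackB_eq_pvK (sizes : List Int) (limit : Int) (hs : ∀ s ∈ sizes, 0 ≤ s)
    (hl : 0 ≤ limit) :
    knapsack_without_profit_top_down_alt sizes limit = pvK sizes limit := by
  unfold knapsack_without_profit_top_down_alt
  rw [if_neg (by omega)]
  have hfold : sizes.reverse.foldl (pvStepRow limit) (List.replicate (limit + 1).toNat 0)
      = pvRowOf limit sizes := by
    rw [List.foldl_reverse, ← pvRowOf_nil limit]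
    induction sizes with
    | nil => rfl
    | cons s rest ih =>
      rw [List.foldr_cons, ih (fun x hx => hs x (List.mem_cons_of_mem _ hx))]
      exact pvStepRow_rowOf limit rest s (hs s List.mem_cons_self)
        (fun x hx => hs x (List.mem_cons_of_mem _ hx))
  rw [hfold, pvRowOf_getD limit sizes limit.toNat (by omega)]
  congr 1
  omega

-- ===== VERDICT (by name: the statement is the Claim_ definition above) =====
theorem knapsack_without_profit_top_down_spec : Claim_equal_knapsack_without_profit_top_down := by
  intro sizes limit _ hpre
  obtain ⟨hs, hl⟩ := hpre
  unfold Spec_knapsack_without_profit_top_down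
  rcases hl with hl | hl
  · rw [knapsackA_eq_pvK sizes limit hs hl, knapsackB_eq_pvK sizes limit hs hl]
  · subst hl
    rcases lt_or_ge limit 0 with h | h
    · simp only [knapsack_without_profit_top_down, knapsack_without_profit_top_down_alt,
        if_pos h]
      rw [pvRecHelper]
      simp
    · rw [knapsackA_eq_pvK [] limit hs h, knapsackB_eq_pvK [] limit hs h]
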